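-- pv_equiv track=rewrite | github.com/rOhaAaaa/Algorithms-and-structures | src/the_length_of_the_max_chain.py | max_chain_length
-- ===== SOURCE A (Python) =====
-- def can_transform(w1, w2):
--     if len(w1) != len(w2) + 1:
--         return False
--     for i in range(len(w1)):
--         if w1[:i] + w1[i+1:] == w2:
--             return True
--     return False
--
-- def max_chain_length(words):
--     words.sort(key=len)
--     max_len = {}
--     max_chain = 1
--
--     for word in words:
--         max_len[word] = 1
--         for prev_word in [w for w in words if len(w) == len(word) - 1]:
--             if can_transform(word, prev_word):
--                 max_len[word] = max(max_len[word], max_len[prev_word] + 1)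
--         max_chain = max(max_chain, max_len[word])
--
--     return max_chain
-- ===== SOURCE B (Python) =====
-- def max_chain_length(words):
--     words.sort(key=len)
--     dp = {}
--     best = 1
--     for word in words:
--         cur = 1
--         for i in range(len(word)):
--             pred = word[:i] + word[i+1:]
--             if pred in dp:
--                 cur = max(cur, dp[pred] + 1)
--         dp[word] = cur
--         best = max(best, cur)
--     return best
-- ===== Notes on version B (the rewrite author's own statement) =====
-- stated objective: faster
-- what changed: Instead of testing every shorter word as a predecessor of every word (nested scan with a per-pair can_transform check), B builds a dict word->chain-length over the length-sorted list and, for each word, looks up each of its len(word) single-character deletions directly in the dict.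
import Mathlib
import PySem

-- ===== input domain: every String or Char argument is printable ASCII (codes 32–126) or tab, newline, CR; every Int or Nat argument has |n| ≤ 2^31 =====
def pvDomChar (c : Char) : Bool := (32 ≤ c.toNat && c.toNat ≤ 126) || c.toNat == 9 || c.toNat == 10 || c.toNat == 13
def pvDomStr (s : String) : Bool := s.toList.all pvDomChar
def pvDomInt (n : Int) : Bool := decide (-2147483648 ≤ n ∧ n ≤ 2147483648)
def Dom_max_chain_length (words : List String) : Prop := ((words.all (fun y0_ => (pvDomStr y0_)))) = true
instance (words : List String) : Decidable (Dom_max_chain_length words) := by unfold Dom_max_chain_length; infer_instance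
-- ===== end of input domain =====

-- B replaces A's quadratic scan over all shorter words with direct dict lookups of each
-- single-character deletion (asymptotically fewer candidate pairs); equal return value proved.
-- Both Pythons sort `words` in place (same side effect); the theorems are about the return value.

-- ===== PORT A =====
-- w[:i] + w[i+1:] as a char list (Python string concatenation of the two slices)
def delAt (w : String) (i : Nat) : List Char :=
  PySem.List.slice w.toList none (some (i : Int)) ++
    PySem.List.slice w.toList (some ((i : Int) + 1)) none

def can_transform (w1 w2 : String) : Bool :=
  if PySem.Str.len w1 != PySem.Str.len w2 + 1 then false
  else
    -- for i in range(len(w1)): if w1[:i]+w1[i+1:] == w2: return True  (string == is list ==)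
    (List.range w1.toList.length).any (fun i => delAt w1 i == w2.toList)

def max_chain_length (words : List String) : Int :=
  let ws := PySem.List.sorted words (fun w => PySem.Str.len w)   -- words.sort(key=len)
  let st := ws.foldl
    (fun (st : PySem.Dict String Int × Int) word =>
      let d := st.1.insert word 1                                -- max_len[word] = 1
      let d := (ws.filter (fun w => PySem.Str.len w == PySem.Str.len word - 1)).foldl
        (fun d prev =>
          if can_transform word prev then
            d.insert word (max (d.getD word 0) (d.getD prev 0 + 1))
          else d) d
      (d, max st.2 (d.getD word 0)))                             -- max_chain = max(max_chain, max_len[word])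
    (PySem.Dict.empty, 1)
  st.2

-- ===== PORT B =====
def max_chain_length_alt (words : List String) : Int :=
  let ws := PySem.List.sorted words (fun w => PySem.Str.len w)   -- words.sort(key=len)
  let st := ws.foldl
    (fun (st : PySem.Dict String Int × Int) word =>
      let cur := (List.range word.toList.length).foldl
        (fun cur i =>
          match st.1.get? (String.ofList (delAt word i)) with        -- pred = word[:i]+word[i+1:]; if pred in dp:
          | some v => max cur (v + 1)
          | none => cur) 1
      (st.1.insert word cur, max st.2 cur))                      -- dp[word] = cur; best = max(best, cur)
    (PySem.Dict.empty, 1)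
  st.2

-- ===== PRECONDITION & SPEC =====
def Spec_max_chain_length (words : List String) (out : Int) : Prop := out = max_chain_length_alt words
instance (words : List String) (out : Int) : Decidable (Spec_max_chain_length words out) := by unfold Spec_max_chain_length; infer_instance

-- ===== CLAIM (what is proved, stated in full; the proofs are below) =====
def Claim_equal_max_chain_length : Prop := ∀ (words : List String), Dom_max_chain_length words → Spec_max_chain_length words (max_chain_length words)

-- ===== LEMMAS AND PROOFS =====

theorem delAt_eq (w : String) (i : Nat) :
    delAt w i = w.toList.take i ++ w.toList.drop (i + 1) := by
  have h1 := PySem.List.slice_to_natCast w.toList i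
  have h2 := PySem.List.slice_from_natCast w.toList (i + 1)
  unfold delAt
  rw [h1]
  rw [show ((i : Int) + 1) = ((i + 1 : Nat) : Int) by push_cast; ring, h2]

theorem length_delAt (w : String) (i : Nat) (h : i < w.toList.length) :
    (delAt w i).length = w.toList.length - 1 := by
  rw [delAt_eq]
  have := String.length_toList (s := w)
  simp [List.length_take, List.length_drop]
  omega

theorem ne_of_len_ne (p w : String) (h : p.toList.length ≠ w.toList.length) : p ≠ w := by
  intro he; exact h (by rw [he])

theorem can_transform_iff (w p : String) :
    can_transform w p = true ↔
      (w.toList.length = p.toList.length + 1 ∧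
        ∃ i, i < w.toList.length ∧ delAt w i = p.toList) := by
  unfold can_transform
  have hw := String.length_toList (s := w)
  have hp := String.length_toList (s := p)
  by_cases h : w.toList.length = p.toList.length + 1
  · simp [PySem.Str.len_eq, h, List.any_eq_true, List.mem_range]
  · simp [PySem.Str.len_eq]
    intro i _ _
    omega

-- A's inner dict-updating loop only rewrites the key `word`; reduced to a scalar fold.
theorem foldA_insert (w : String) :
    ∀ (lst : List String) (d : PySem.Dict String Int) (b : Int),
    (∀ p ∈ lst, p ≠ w) →
    lst.foldl
      (fun d prev =>
        if can_transform w prev then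
          d.insert w (max (d.getD w 0) (d.getD prev 0 + 1))
        else d) (d.insert w b)
    = d.insert w
        (lst.foldl (fun b prev => if can_transform w prev then max b (d.getD prev 0 + 1) else b) b) := by
  intro lst
  induction lst with
  | nil => intro d b _; rfl
  | cons p t ih =>
    intro d b hne
    have hpw : p ≠ w := hne p (List.mem_cons_self)
    by_cases hc : can_transform w p = true
    · simp only [List.foldl_cons, hc, if_true,
        PySem.Dict.getD_insert_self, PySem.Dict.getD_insert_of_ne d b 0 hpw,
        PySem.Dict.insert_insert_self]
      exact ih d _ (fun q hq => hne q (List.mem_cons_of_mem _ hq))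
    · simp only [List.foldl_cons, hc, if_false, Bool.false_eq_true]
      exact ih d b (fun q hq => hne q (List.mem_cons_of_mem _ hq))

theorem foldl_if_max {α : Type} (c : α → Bool) (f : α → Int) :
    ∀ (l : List α) (a : Int),
    l.foldl (fun b x => if c x then max b (f x) else b) a
      = ((l.filter c).map f).foldl max a := by
  intro l
  induction l with
  | nil => intro a; rfl
  | cons x t ih =>
    intro a
    by_cases hc : c x = true
    · simp [List.foldl_cons, hc, ih]
    · simp [List.foldl_cons, hc, ih]

theorem foldl_max_mem_or (l : List Int) : ∀ (a : Int),
    l.foldl max a = a ∨ l.foldl max a ∈ l := by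
  induction l with
  | nil => intro a; left; rfl
  | cons x t ih =>
    intro a
    rcases ih (max a x) with h | h
    · rcases max_choice a x with hm | hm
      · left; rw [List.foldl_cons, h, hm]
      · right; rw [List.foldl_cons, h, hm]; exact List.mem_cons_self
    · right; exact List.mem_cons_of_mem _ h

theorem foldl_max_congr (l1 l2 : List Int) (a : Int)
    (h : ∀ v, v ∈ l1 ↔ v ∈ l2) : l1.foldl max a = l2.foldl max a := by
  have key : ∀ (u v : List Int), (∀ x, x ∈ u ↔ x ∈ v) → u.foldl max a ≤ v.foldl max a := by
    intro u v huv
    rcases foldl_max_mem_or u a with he | hm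
    · rw [he]; exact (PySem.List.le_foldl_max v a).1
    · exact (PySem.List.le_foldl_max v a).2 _ ((huv _).mp hm)
  exact le_antisymm (key l1 l2 h) (key l2 l1 (fun v => (h v).symm))

-- the match on dp.get? is the contains/getD conditional
theorem match_get?_eq (d : PySem.Dict String Int) (k : String) (b : Int) :
    (match d.get? k with
      | some v => max b (v + 1)
      | none => b)
    = if d.contains k then max b (d.getD k 0 + 1) else b := by
  rcases hg : d.get? k with _ | v <;>
    simp [PySem.Dict.contains_eq_isSome_get?, hg, PySem.Dict.getD_eq_get?_getD]

-- the heart: with every word of length |w|-1 already a key of d (and every key a word of ws),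
-- A's scan over the shorter words equals B's scan over the deletions of w.
theorem val_eq (ws : List String) (d : PySem.Dict String Int) (w : String)
    (hkeys : ∀ p, p ∈ d.keys → p ∈ ws)
    (hshort : ∀ p ∈ ws, p.toList.length + 1 = w.toList.length → p ∈ d.keys) :
    (ws.filter (fun p => PySem.Str.len p == PySem.Str.len w - 1)).foldl
      (fun b prev => if can_transform w prev then max b (d.getD prev 0 + 1) else b) 1
    = (List.range w.toList.length).foldl
        (fun b i =>
          match d.get? (String.ofList (delAt w i)) with
          | some v => max b (v + 1)
          | none => b) 1 := by
  have hB : (List.range w.toList.length).foldl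
        (fun b i =>
          match d.get? (String.ofList (delAt w i)) with
          | some v => max b (v + 1)
          | none => b) 1
      = (List.range w.toList.length).foldl
          (fun b i => if d.contains (String.ofList (delAt w i)) then
              max b (d.getD (String.ofList (delAt w i)) 0 + 1) else b) 1 := by
    apply List.foldl_ext
    intro b i _ ; exact match_get?_eq d _ b
  rw [hB,
    foldl_if_max (fun prev => can_transform w prev) (fun prev => d.getD prev 0 + 1),
    foldl_if_max (fun i => d.contains (String.ofList (delAt w i)))
      (fun i => d.getD (String.ofList (delAt w i)) 0 + 1)]
  apply foldl_max_congr
  intro v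
  simp only [List.mem_map, List.mem_filter, List.mem_range]
  constructor
  · rintro ⟨p, ⟨⟨hmem, hlen⟩, hct⟩, hv⟩
    rcases (can_transform_iff w p).mp hct with ⟨_, i, hi, hdel⟩
    refine ⟨i, ⟨hi, ?_⟩, ?_⟩
    · have hpk : p ∈ d.keys := by
        apply hshort p hmem
        have := beq_iff_eq.mp hlen
        simp [PySem.Str.len_eq] at this
        omega
      have he : String.ofList (delAt w i) = p := by
        rw [hdel, String.ofList_toList]
      rw [(PySem.Dict.contains_iff_mem_keys d _)]
      rw [he]; exact hpk
    · have he : String.ofList (delAt w i) = p := by rw [hdel, String.ofList_toList]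
      rw [he]; exact hv
  · rintro ⟨i, ⟨hi, hcont⟩, hv⟩
    set p := String.ofList (delAt w i) with hp
    have hpl : p.toList = delAt w i := by rw [hp, String.toList_ofList]
    have hplen : p.toList.length + 1 = w.toList.length := by
      rw [hpl, length_delAt w i hi]; omega
    have hpk : p ∈ d.keys := (PySem.Dict.contains_iff_mem_keys d p).mp hcont
    have hwl := String.length_toList (s := w)
    have hpl2 := String.length_toList (s := p)
    refine ⟨p, ⟨⟨hkeys p hpk, ?_⟩, ?_⟩, hv⟩
    · rw [beq_iff_eq]
      simp [PySem.Str.len_eq]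
      omega
    · exact (can_transform_iff w p).mpr ⟨by omega, i, hi, hpl.symm⟩

-- the two folds run in lockstep: same dict, same running maximum
theorem run_eq (ws : List String)
    (hsorted : ws.Pairwise (fun a b => PySem.Str.len a ≤ PySem.Str.len b)) :
    ∀ (rest pre : List String) (d : PySem.Dict String Int) (m : Int),
    ws = pre ++ rest →
    (∀ p, p ∈ d.keys ↔ p ∈ pre) →
    rest.foldl
      (fun (st : PySem.Dict String Int × Int) word =>
        let d := st.1.insert word 1
        let d := (ws.filter (fun w => PySem.Str.len w == PySem.Str.len word - 1)).foldl
          (fun d prev =>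
            if can_transform word prev then
              d.insert word (max (d.getD word 0) (d.getD prev 0 + 1))
            else d) d
        (d, max st.2 (d.getD word 0))) (d, m)
    = rest.foldl
        (fun (st : PySem.Dict String Int × Int) word =>
          let cur := (List.range word.toList.length).foldl
            (fun cur i =>
              match st.1.get? (String.ofList (delAt word i)) with
              | some v => max cur (v + 1)
              | none => cur) 1
          (st.1.insert word cur, max st.2 cur)) (d, m) := by
  intro rest
  induction rest with
  | nil => intro pre d m _ _; rfl
  | cons w t ih =>
    intro pre d m hws hinv
    have hfilter_ne : ∀ p ∈ ws.filter (fun q => PySem.Str.len q == PySem.Str.len w - 1), p ≠ w := by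
      intro p hp
      have := (List.mem_filter.mp hp).2
      have hlen := beq_iff_eq.mp this
      apply ne_of_len_ne
      have hwl := String.length_toList (s := w)
      have hpl := String.length_toList (s := p)
      simp [PySem.Str.len_eq] at hlen
      omega
    have hshort : ∀ p ∈ ws, p.toList.length + 1 = w.toList.length → p ∈ d.keys := by
      intro p hmem hlen
      rw [hinv]
      rw [hws] at hmem
      rcases List.mem_append.mp hmem with h | h
      · exact h
      · exfalso
        rcases List.mem_cons.mp h with rfl | h
        · omega
        · have hpair := hsorted
          rw [hws] at hpair
          have := ((List.pairwise_append.mp hpair).2.2)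
          have h2 := (List.pairwise_cons.mp (List.pairwise_append.mp hpair).2.1).1 p h
          have hwl := String.length_toList (s := w)
          have hpl := String.length_toList (s := p)
          simp [PySem.Str.len_eq] at h2
          omega
    have hkeys : ∀ p, p ∈ d.keys → p ∈ ws := by
      intro p hp
      rw [hws]
      exact List.mem_append.mpr (Or.inl ((hinv p).mp hp))
    have hval := val_eq ws d w hkeys hshort
    simp only [List.foldl_cons]
    have hA := foldA_insert w (ws.filter (fun q => PySem.Str.len q == PySem.Str.len w - 1)) d 1 hfilter_ne
    rw [hA]
    rw [PySem.Dict.getD_insert_self]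
    rw [hval]
    apply ih (pre ++ [w])
    · rw [hws]; simp
    · intro p
      rw [PySem.Dict.mem_keys_insert]
      rw [hinv p]
      simp [or_comm]

-- ===== VERDICT (by name: the statement is the Claim_ definition above) =====
theorem max_chain_length_spec : Claim_equal_max_chain_length := by
  unfold Claim_equal_max_chain_length
  intro words _
  unfold Spec_max_chain_length max_chain_length max_chain_length_alt
  have h := run_eq (PySem.List.sorted words (fun w => PySem.Str.len w))
    (PySem.List.sorted_pairwise words (fun w => PySem.Str.len w))
    (PySem.List.sorted words (fun w => PySem.Str.len w)) []
    PySem.Dict.empty 1 (by simp) (by simp [PySem.Dict.keys_empty])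
  simpa using congrArg Prod.snd h
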